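-- pv_equiv track=rewrite | github.com/unabl4/PythonCodeClub | max_product_of_quintet/max_product_of_quintet_set.py | max_product_of_quintet
-- ===== SOURCE A (Python) =====
-- def product(iterable):
--     p = 1
--     for n in iterable:
--         p *= n
--     return p
--
-- def max_product_of_quintet(numbers):
--     assert len(numbers) >= 5 # exception otherwise
--
--     numbers.sort()
--
--     # numbers selection
--     candidates = []
--     for i in range(6):
--         right = [] if i == 5 else numbers[-5+i:]
--         num_set = numbers[:i]+right # take most positive and most negative numbers
--         candidates.append(product(num_set))
--
--     return max(candidates)
-- ===== SOURCE B (Python) =====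
-- def _ins(xs, x):
--     # insert x into ascending-sorted xs (after any equal elements)
--     i = 0
--     while i < len(xs) and xs[i] <= x:
--         i += 1
--     return xs[:i] + [x] + xs[i:]
--
-- def max_product_of_quintet(numbers):
--     assert len(numbers) >= 5  # exception otherwise
--
--     # one linear pass: keep the 5 smallest and the 5 largest seen so far
--     small, big = [], []
--     for x in numbers:
--         if len(small) < 5 or x <= small[-1]:
--             small = _ins(small, x)[:5]
--         if len(big) < 5 or x >= big[0]:
--             big = _ins(big, x)[-5:]
--
--     # combine i of the smallest with 5-i of the largest, i = 0..5
--     best = None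
--     for i in range(6):
--         p = 1
--         for v in small[:i] + big[i:]:
--             p *= v
--         if best is None or p > best:
--             best = p
--     return best
-- ===== Notes on version B (the rewrite author's own statement) =====
-- stated objective: faster
-- what changed: Replaces the full in-place sort with a single linear pass that maintains only the 5 smallest and 5 largest elements via bounded insertion, then combines i smallest with 5-i largest; B does not mutate its argument.
import Mathlib
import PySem

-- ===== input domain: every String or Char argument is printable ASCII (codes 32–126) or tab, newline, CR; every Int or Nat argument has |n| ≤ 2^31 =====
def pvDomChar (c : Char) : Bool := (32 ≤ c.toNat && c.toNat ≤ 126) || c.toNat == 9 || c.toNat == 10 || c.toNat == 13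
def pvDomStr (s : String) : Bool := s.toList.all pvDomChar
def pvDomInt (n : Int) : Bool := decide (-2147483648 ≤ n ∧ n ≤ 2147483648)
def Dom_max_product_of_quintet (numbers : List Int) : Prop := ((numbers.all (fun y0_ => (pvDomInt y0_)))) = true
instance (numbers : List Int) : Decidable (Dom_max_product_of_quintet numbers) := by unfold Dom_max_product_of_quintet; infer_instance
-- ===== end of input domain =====

-- B replaces A's full sort with one linear pass keeping only the 5 smallest and 5 largest
-- elements; equivalence is about the RETURN value only (A sorts its argument in place, B does not).

-- ===== PORT A =====
-- helper `product` of Source A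
def pvProd (l : List Int) : Int := l.foldl (fun p n => p * n) 1

def max_product_of_quintet (numbers : List Int) : Int :=
  -- numbers.sort() sorts in place; return-value port uses the sorted list from here on
  let s := PySem.List.sorted numbers (fun x => x) false
  let candidates := (PySem.List.pyRange 0 6 1).foldl (fun cand i =>
    let right := if i == 5 then ([] : List Int) else PySem.List.slice s (some (-5 + i)) none
    let numSet := PySem.List.slice s none (some i) ++ right
    cand ++ [pvProd numSet]) []
  -- max(candidates): candidates always has 6 entries, so max? is `some`
  (PySem.List.max? candidates (fun x => x)).getD 0

-- ===== PORT B =====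
-- helper `_ins` of Source B: insert x into ascending-sorted xs, after any equal elements
def pvInsA (x : Int) : List Int → List Int
  | [] => [x]
  | a :: t => if a ≤ x then a :: pvInsA x t else x :: a :: t

-- one loop iteration of Source B's linear pass (small, big) update;
-- `x <= small[-1]` / `x >= big[0]` are only reached when the list has 5 elements (short-circuit `or`),
-- so getLastD/headD with default 0 is exact
def pvStep (sb : List Int × List Int) (x : Int) : List Int × List Int :=
  let small := if sb.1.length < 5 || decide (x ≤ sb.1.getLastD 0) then (pvInsA x sb.1).take 5 else sb.1
  let big := if sb.2.length < 5 || decide (sb.2.headD 0 ≤ x) then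
      (pvInsA x sb.2).drop ((pvInsA x sb.2).length - 5) else sb.2
  (small, big)

-- Source B's inner accumulation loop `p = 1; for v in small[:i] + big[i:]: p *= v`, factored out; exact
def pvProdB (small big : List Int) (i : Int) : Int :=
  (PySem.List.slice small none (some i) ++ PySem.List.slice big (some i) none).foldl
    (fun p v => p * v) 1

def max_product_of_quintet_alt (numbers : List Int) : Int :=
  let sb := numbers.foldl pvStep ([], [])
  let best := (PySem.List.pyRange 0 6 1).foldl (fun (best : Option Int) i =>
    match best with
    | none => some (pvProdB sb.1 sb.2 i)
    | some b => if b < pvProdB sb.1 sb.2 i then some (pvProdB sb.1 sb.2 i) else some b) none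
  -- best is `some` after the 6 iterations
  best.getD 0

-- ===== PRECONDITION & SPEC =====
-- A's `assert len(numbers) >= 5` raises AssertionError on shorter lists
def Pre_max_product_of_quintet (numbers : List Int) : Prop := 5 ≤ numbers.length
instance (numbers : List Int) : Decidable (Pre_max_product_of_quintet numbers) := by
  unfold Pre_max_product_of_quintet; infer_instance
def pvWitness_max_product_of_quintet : List Int := [3, -1, 4, 1, -5, 9]

def Spec_max_product_of_quintet (numbers : List Int) (out : Int) : Prop := out = max_product_of_quintet_alt numbers
instance (numbers : List Int) (out : Int) : Decidable (Spec_max_product_of_quintet numbers out) := by unfold Spec_max_product_of_quintet; infer_instance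

-- ===== CLAIM (what is proved, stated in full; the proofs are below) =====
def Claim_equal_max_product_of_quintet : Prop := ∀ (numbers : List Int), Dom_max_product_of_quintet numbers → Pre_max_product_of_quintet numbers → Spec_max_product_of_quintet numbers (max_product_of_quintet numbers)

-- ===== LEMMAS AND PROOFS =====

theorem mem_pvInsA {x y : Int} : ∀ {l : List Int}, y ∈ pvInsA x l ↔ y = x ∨ y ∈ l := by
  intro l
  induction l with
  | nil => simp [pvInsA]
  | cons a t ih =>
    by_cases h : a ≤ x <;> simp [pvInsA, h, ih] <;> tauto

theorem length_pvInsA (x : Int) : ∀ (l : List Int), (pvInsA x l).length = l.length + 1 := by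
  intro l
  induction l with
  | nil => rfl
  | cons a t ih => by_cases h : a ≤ x <;> simp [pvInsA, h, ih]

theorem pairwise_pvInsA {x : Int} : ∀ {l : List Int}, l.Pairwise (· ≤ ·) →
    (pvInsA x l).Pairwise (· ≤ ·) := by
  intro l hl
  induction l with
  | nil => simp [pvInsA]
  | cons a t ih =>
    rw [List.pairwise_cons] at hl
    by_cases h : a ≤ x
    · simp only [pvInsA, if_pos h]
      rw [List.pairwise_cons]
      refine ⟨?_, ih hl.2⟩
      intro y hy
      rcases mem_pvInsA.mp hy with rfl | hy
      · exact h
      · exact hl.1 y hy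
    · simp only [pvInsA, if_neg h]
      push_neg at h
      rw [List.pairwise_cons]
      constructor
      · intro y hy
        rcases List.mem_cons.mp hy with rfl | hy
        · exact le_of_lt h
        · exact le_trans (le_of_lt h) (hl.1 y hy)
      · exact List.pairwise_cons.mpr hl

theorem perm_pvInsA (x : Int) : ∀ (l : List Int), (pvInsA x l).Perm (x :: l) := by
  intro l
  induction l with
  | nil => simp [pvInsA]
  | cons a t ih =>
    by_cases h : a ≤ x
    · simp only [pvInsA, if_pos h]
      exact (ih.cons a).trans (List.Perm.swap x a t)
    · simp [pvInsA, h]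

theorem pvInsA_append_of_le {x : Int} : ∀ {l : List Int}, (∀ y ∈ l, y ≤ x) →
    pvInsA x l = l ++ [x] := by
  intro l hl
  induction l with
  | nil => rfl
  | cons a t ih =>
    simp only [pvInsA, if_pos (hl a (by simp))]
    rw [ih (fun y hy => hl y (by simp [hy]))]
    rfl

-- truncation to the first 5 commutes with insertion
theorem take_pvInsA (x : Int) : ∀ (l : List Int) (k : Nat),
    (pvInsA x (l.take k)).take k = (pvInsA x l).take k := by
  intro l
  induction l with
  | nil => intro k; simp
  | cons a t ih =>
    intro k
    cases k with
    | zero => rfl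
    | succ m =>
      by_cases h : a ≤ x
      · simp [pvInsA, h, ih m]
      · cases m with
        | zero => simp [pvInsA, h]
        | succ p =>
          simp [pvInsA, h, List.take_take]

-- truncation to the last 5 commutes with insertion, on a sorted list
theorem dropL_pvInsA (x : Int) : ∀ (S : List Int), S.Pairwise (· ≤ ·) →
    (pvInsA x (S.drop (S.length - 5))).drop ((pvInsA x (S.drop (S.length - 5))).length - 5)
      = (pvInsA x S).drop ((pvInsA x S).length - 5) := by
  intro S
  induction S with
  | nil => intro _; simp
  | cons a t ih =>
    intro hS
    rw [List.pairwise_cons] at hS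
    by_cases hlen : (a :: t).length ≤ 5
    · have h0 : (a :: t).length - 5 = 0 := by omega
      rw [h0, List.drop_zero]
    · have ht5 : 5 ≤ t.length := by simp at hlen; omega
      have hd : (a :: t).drop ((a :: t).length - 5) = t.drop (t.length - 5) := by
        have : (a :: t).length - 5 = (t.length - 5) + 1 := by simp; omega
        rw [this, List.drop_succ_cons]
      by_cases hax : a ≤ x
      · have hR : pvInsA x (a :: t) = a :: pvInsA x t := by simp [pvInsA, hax]
        have hRd : (pvInsA x (a :: t)).drop ((pvInsA x (a :: t)).length - 5)
            = (pvInsA x t).drop ((pvInsA x t).length - 5) := by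
          rw [hR]
          have : (a :: pvInsA x t).length - 5 = ((pvInsA x t).length - 5) + 1 := by
            simp [length_pvInsA]; omega
          rw [this, List.drop_succ_cons]
        rw [hd, hRd]
        exact ih hS.2
      · have hR : pvInsA x (a :: t) = x :: a :: t := by simp [pvInsA, hax]
        push_neg at hax
        -- RHS = drop (t.length - 5) t
        have hRd : (pvInsA x (a :: t)).drop ((pvInsA x (a :: t)).length - 5)
            = t.drop (t.length - 5) := by
          rw [hR]
          have : (x :: a :: t).length - 5 = ((t.length - 5) + 1) + 1 := by simp; omega
          rw [this, List.drop_succ_cons, List.drop_succ_cons]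
        rw [hd, hRd]
        -- LHS: let u = drop (t.length - 5) t, length 5, all elements ≥ a > x
        set u := t.drop (t.length - 5) with hu
        have hulen : u.length = 5 := by rw [hu, List.length_drop]; omega
        obtain ⟨h, r, hur⟩ : ∃ h r, u = h :: r := by
          have hne : u ≠ [] := by intro h0; rw [h0] at hulen; simp at hulen
          obtain ⟨h, r, hr⟩ := List.exists_cons_of_ne_nil hne
          exact ⟨h, r, hr⟩
        have hhm : h ∈ t := by
          have : h ∈ u := by simp [hur]
          exact List.mem_of_mem_drop (hu ▸ this)
        have hxh : ¬ h ≤ x := by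
          have := hS.1 h hhm
          omega
        have : pvInsA x u = x :: u := by rw [hur]; simp [pvInsA, hxh]
        rw [this]
        have h6 : (x :: u).length - 5 = 1 := by simp [hulen]
        rw [h6, List.drop_one, List.tail_cons]

-- on a sorted list every element is bounded by the last one
theorem le_getLastD_of_sorted : ∀ (u : List Int), u.Pairwise (· ≤ ·) →
    ∀ y ∈ u, y ≤ u.getLastD 0 := by
  intro u
  induction u with
  | nil => intro _ y hy; simp at hy
  | cons a t ih =>
    intro hu y hy
    rw [List.pairwise_cons] at hu
    cases t with
    | nil => simp at hy; simp [hy]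
    | cons b r =>
      have hlast : (a :: b :: r).getLastD 0 = (b :: r).getLastD 0 := rfl
      rw [hlast]
      rcases List.mem_cons.mp hy with rfl | hy
      · have hmem : (b :: r).getLastD 0 ∈ b :: r := by
          have := List.getLast_mem (l := b :: r) (by simp)
          simpa [List.getLastD_eq_getLast?, List.getLast?_eq_getLast (l := b :: r) (by simp)]
            using this
        exact hu.1 _ hmem
      · exact ih hu.2 y hy

-- the linear pass maintains exactly (first 5, last 5) of the sorted prefix
theorem fold_pvStep_inv : ∀ (l S : List Int), S.Pairwise (· ≤ ·) →
    l.foldl pvStep (S.take 5, S.drop (S.length - 5))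
      = ((l.foldl (fun acc x => pvInsA x acc) S).take 5,
         (l.foldl (fun acc x => pvInsA x acc) S).drop
           ((l.foldl (fun acc x => pvInsA x acc) S).length - 5)) := by
  intro l
  induction l with
  | nil => intro S _; rfl
  | cons x l ih =>
    intro S hS
    have hstep : pvStep (S.take 5, S.drop (S.length - 5)) x
        = ((pvInsA x S).take 5, (pvInsA x S).drop ((pvInsA x S).length - 5)) := by
      unfold pvStep
      dsimp only
      have hsmall : (if (S.take 5).length < 5 || decide (x ≤ (S.take 5).getLastD 0)
          then (pvInsA x (S.take 5)).take 5 else S.take 5) = (pvInsA x S).take 5 := by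
        by_cases hc : (S.take 5).length < 5 || decide (x ≤ (S.take 5).getLastD 0)
        · rw [if_pos hc, take_pvInsA]
        · rw [if_neg hc]
          simp only [Bool.or_eq_true, decide_eq_true_eq, not_or, not_lt,
            List.length_take] at hc
          have h5 : (S.take 5).length = 5 := by
            rw [List.length_take]; omega
          have hsort : (S.take 5).Pairwise (· ≤ ·) := hS.sublist (List.take_sublist 5 S)
          have hall : ∀ y ∈ S.take 5, y ≤ x := by
            intro y hy
            have := le_getLastD_of_sorted _ hsort y hy
            have hx : (S.take 5).getLastD 0 ≤ x := by
              rcases hc with ⟨_, hc⟩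
              omega
            omega
          rw [← take_pvInsA, pvInsA_append_of_le hall,
            List.take_append_of_le_length (le_of_eq h5.symm)]
          simp [List.take_take]
      have hbig : (if (S.drop (S.length - 5)).length < 5 ||
            decide ((S.drop (S.length - 5)).headD 0 ≤ x)
          then (pvInsA x (S.drop (S.length - 5))).drop
                ((pvInsA x (S.drop (S.length - 5))).length - 5)
          else S.drop (S.length - 5))
          = (pvInsA x S).drop ((pvInsA x S).length - 5) := by
        by_cases hc : (S.drop (S.length - 5)).length < 5 ||
            decide ((S.drop (S.length - 5)).headD 0 ≤ x)
        · rw [if_pos hc, dropL_pvInsA x S hS]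
        · rw [if_neg hc]
          simp only [Bool.or_eq_true, decide_eq_true_eq, not_or, not_lt,
            List.length_drop] at hc
          have h5 : (S.drop (S.length - 5)).length = 5 := by
            rw [List.length_drop]; omega
          set u := S.drop (S.length - 5) with hu
          have hu5 : u.length = 5 := h5
          obtain ⟨h, r, hur⟩ : ∃ h r, u = h :: r := by
            have hne : u ≠ [] := by intro h0; rw [h0] at hu5; simp at hu5
            obtain ⟨h, r, hr⟩ := List.exists_cons_of_ne_nil hne
            exact ⟨h, r, hr⟩
          have hxh : ¬ h ≤ x := by
            rcases hc with ⟨-, hc⟩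
            rw [hur] at hc
            simp at hc
            omega
          rw [← dropL_pvInsA x S hS, ← hu, hur]
          simp only [pvInsA, if_neg hxh]
          have : (x :: h :: r).length - 5 = 1 := by
            have : (h :: r).length = 5 := hur ▸ h5
            simp at this ⊢; omega
          rw [this, List.drop_one, List.tail_cons, ← hur]
      rw [hsmall, hbig]
    rw [List.foldl_cons, hstep, List.foldl_cons]
    exact ih (pvInsA x S) (pairwise_pvInsA hS)

-- the accumulated insertions are Python's sorted(numbers)
theorem ssort_perm : ∀ (l S : List Int), (l.foldl (fun acc x => pvInsA x acc) S).Perm (l ++ S) := by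
  intro l
  induction l with
  | nil => intro S; simp
  | cons x l ih =>
    intro S
    rw [List.foldl_cons]
    refine ((ih (pvInsA x S)).trans ?_)
    have h1 := ((perm_pvInsA x S).append_left l).trans (List.perm_middle (a := x) (l₁ := l) (l₂ := S))
    simpa using h1

theorem ssort_pairwise : ∀ (l S : List Int), S.Pairwise (· ≤ ·) →
    (l.foldl (fun acc x => pvInsA x acc) S).Pairwise (· ≤ ·) := by
  intro l
  induction l with
  | nil => intro S hS; exact hS
  | cons x l ih =>
    intro S hS
    exact ih (pvInsA x S) (pairwise_pvInsA hS)

theorem sorted_eq_ssort (l : List Int) :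
    PySem.List.sorted l (fun x => x) false = l.foldl (fun acc x => pvInsA x acc) [] := by
  apply PySem.List.sorted_id_eq_of_perm_of_pairwise
  · simpa using ssort_perm l []
  · exact ssort_pairwise l [] (by simp)

-- Source B's running best over the six candidates is a running max
theorem optfold_aux (g : Int → Int) : ∀ (l : List Int) (c : Int),
    List.foldl (fun (best : Option Int) i =>
      match best with
      | none => some (g i)
      | some b => if b < g i then some (g i) else some b) (some c) l
    = some (List.foldl (fun b i => max b (g i)) c l) := by
  intro l
  induction l with
  | nil => intro c; rfl
  | cons i l ih =>
    intro c
    rw [List.foldl_cons, List.foldl_cons]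
    by_cases h : c < g i
    · simp only [if_pos h, ih, max_eq_right (le_of_lt h)]
    · simp only [if_neg h, ih, max_eq_left (not_lt.mp h)]

theorem optfold (g : Int → Int) (i : Int) (l : List Int) :
    List.foldl (fun (best : Option Int) j =>
      match best with
      | none => some (g j)
      | some b => if b < g j then some (g j) else some b) none (i :: l)
    = some (List.foldl (fun b j => max b (g j)) (g i) l) := by
  rw [List.foldl_cons]
  exact optfold_aux g l (g i)

-- ===== VERDICT (by name: the statement is the Claim_ definition above) =====
set_option maxHeartbeats 1000000 in
theorem max_product_of_quintet_spec : Claim_equal_max_product_of_quintet := by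
  unfold Claim_equal_max_product_of_quintet
  intro numbers _ hpre
  unfold Spec_max_product_of_quintet Pre_max_product_of_quintet at *
  unfold max_product_of_quintet max_product_of_quintet_alt
  dsimp only
  set s := PySem.List.sorted numbers (fun x => x) false with hs
  have hslen : 5 ≤ s.length := by
    rw [hs, PySem.List.length_sorted]; exact hpre
  -- the linear pass yields (first 5, last 5) of the sorted list
  have hfold : numbers.foldl pvStep ([], []) = (s.take 5, s.drop (s.length - 5)) := by
    have h0 : (([], []) : List Int × List Int)
        = (([] : List Int).take 5, ([] : List Int).drop (([] : List Int).length - 5)) := rfl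
    rw [h0, fold_pvStep_inv numbers [] (by simp), hs, sorted_eq_ssort]
  rw [hfold]
  dsimp only
  clear_value s
  clear hs
  -- the six candidate products coincide
  have hn4 : s.length - 5 + 1 = s.length - 4 := by omega
  have hn3 : s.length - 5 + 2 = s.length - 3 := by omega
  have hn2 : s.length - 5 + 3 = s.length - 2 := by omega
  have hn1 : s.length - 5 + 4 = s.length - 1 := by omega
  have hbig5 : (s.drop (s.length - 5)).drop 5 = [] := by
    apply List.drop_eq_nil_of_le
    rw [List.length_drop]; omega
  have hq : ∀ i : Int, i = 0 ∨ i = 1 ∨ i = 2 ∨ i = 3 ∨ i = 4 ∨ i = 5 →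
      pvProdB (s.take 5) (s.drop (s.length - 5)) i
        = pvProd (PySem.List.slice s none (some i) ++
            (if i == 5 then ([] : List Int) else PySem.List.slice s (some (-5 + i)) none)) := by
    intro i hi
    unfold pvProdB pvProd
    rcases hi with rfl | rfl | rfl | rfl | rfl | rfl
    · norm_num
      simp [pysem]
    · norm_num
      simp [pysem, List.take_take, List.drop_drop, hn4]
    · norm_num
      simp [pysem, List.take_take, List.drop_drop, hn3]
    · norm_num
      simp [pysem, List.take_take, List.drop_drop, hn2]
    · norm_num
      simp [pysem, List.take_take, List.drop_drop, hn1]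
    · norm_num
      simp [pysem, List.take_take, hbig5]
  -- unfold the six-step loops
  have hrange : PySem.List.pyRange 0 6 1 = [0, 1, 2, 3, 4, 5] := by decide
  rw [hrange, optfold (fun i => pvProdB (s.take 5) (s.drop (s.length - 5)) i) 0 [1, 2, 3, 4, 5]]
  simp only [List.foldl_cons, List.foldl_nil, List.nil_append, List.cons_append,
    Option.getD_some]
  rw [PySem.List.max?_id_cons]
  simp only [List.foldl_cons, List.foldl_nil, Option.getD_some]
  rw [hq 0 (by norm_num), hq 1 (by norm_num), hq 2 (by norm_num), hq 3 (by norm_num),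
    hq 4 (by norm_num), hq 5 (by norm_num)]
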